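-- pv_equiv track=rewrite | github.com/bomendez/bomendez.github.io | VowelSearch/vowelsearch.py | contains_vowel
-- ===== SOURCE A (Python) =====
-- def check_vowel(item):
--     '''
--         Function -- check_vowel
--             Checks whether the string contains a vowel
--         Parameter:
--             item -- expecting a string
--         Returns:
--             True -- if the string contains a vowel
--             False -- if the string does not contain a vowel
--     '''
--     VOWELS = {"a", "e", "i", "o", "u", "A", "E", "I", "O", "U"}
--     if len(item) == 0:
--         return False
--     else:
--         if item[0] in VOWELS:
--             return True
--         else:
--             return check_vowel(item[1:])
--
-- def contains_vowel(lst):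
--     '''
--         Function -- contains_vowel
--             Checks whether a list contains items with vowels
--         Parameter:
--             item -- expecting a list
--         Returns:
--             True -- if every item in the string contains a vowel
--             False -- if every item in the string does not contain a vowel
--     '''
--     if len(lst) == 0:
--         return False
--     elif len(lst) == 1:
--         if check_vowel(lst[0]):
--             return True
--         return False
--     else:
--         return check_vowel(lst[0]) and contains_vowel(lst[1:])
-- ===== SOURCE B (Python) =====
-- VOWELS = {"a", "e", "i", "o", "u", "A", "E", "I", "O", "U"}
--
-- def contains_vowel(lst):
--     if not lst:
--         return False
--     for item in lst:
--         if not any(c in VOWELS for c in item):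
--             return False
--     return True
-- ===== Notes on version B (the rewrite author's own statement) =====
-- stated objective: idiomatic
-- what changed: Replaces the double recursion (list-level recursion with a single-element special case and a per-character recursive check_vowel slicing item[1:]) with one iterative loop over the items plus an any()-membership test per item, guarded by an explicit empty-list check.
import Mathlib
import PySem

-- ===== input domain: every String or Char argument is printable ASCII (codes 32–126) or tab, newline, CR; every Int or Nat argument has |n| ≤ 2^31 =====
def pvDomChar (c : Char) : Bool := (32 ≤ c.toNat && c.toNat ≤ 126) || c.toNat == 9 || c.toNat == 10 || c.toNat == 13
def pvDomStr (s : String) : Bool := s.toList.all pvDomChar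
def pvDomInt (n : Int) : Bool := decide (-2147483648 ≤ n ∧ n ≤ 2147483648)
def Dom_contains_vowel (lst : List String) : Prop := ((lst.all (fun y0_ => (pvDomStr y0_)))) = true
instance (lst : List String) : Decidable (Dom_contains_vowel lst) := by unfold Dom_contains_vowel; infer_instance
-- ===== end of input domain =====

-- B collapses A's two recursions into one iterative pass with an any()-membership test per item (idiomatic; same behaviour).


-- ===== PORT A =====
-- VOWELS set (Python set of single chars; membership test only, ported as char membership)
def pvVowels : List Char := ['a','e','i','o','u','A','E','I','O','U']

-- check_vowel: recursion over the string's characters (item[0], item[1:])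
def check_vowel : List Char → Bool
  | [] => false
  | c :: rest => if c ∈ pvVowels then true else check_vowel rest

def contains_vowel : List String → Bool
  | [] => false
  | [x] => if check_vowel x.toList then true else false
  | x :: rest => check_vowel x.toList && contains_vowel rest

-- ===== PORT B =====
-- iterative: empty-list guard, then a pass over the items; `any(c in VOWELS for c in item)` per item
def contains_vowel_alt (lst : List String) : Bool :=
  if lst.isEmpty then false
  else lst.all (fun item => item.toList.any (fun c => c ∈ pvVowels))

-- ===== PRECONDITION & SPEC =====
def Spec_contains_vowel (lst : List String) (out : Bool) : Prop := out = contains_vowel_alt lst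
instance (lst : List String) (out : Bool) : Decidable (Spec_contains_vowel lst out) := by unfold Spec_contains_vowel; infer_instance

-- ===== CLAIM (what is proved, stated in full; the proofs are below) =====
def Claim_equal_contains_vowel : Prop := ∀ (lst : List String), Dom_contains_vowel lst → Spec_contains_vowel lst (contains_vowel lst)

-- ===== LEMMAS AND PROOFS =====
theorem check_vowel_eq_any (cs : List Char) :
    check_vowel cs = cs.any (fun c => c ∈ pvVowels) := by
  induction cs with
  | nil => rfl
  | cons c rest ih =>
    by_cases h : c ∈ pvVowels <;> simp [check_vowel, h, ih]

theorem contains_vowel_eq (lst : List String) :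
    contains_vowel lst = contains_vowel_alt lst := by
  induction lst with
  | nil => rfl
  | cons x rest ih =>
    cases rest with
    | nil =>
      simp [contains_vowel, contains_vowel_alt, check_vowel_eq_any]
      rw [Bool.eq_iff_iff]
      simp [List.any_eq_true]
    | cons y t =>
      simp [contains_vowel, contains_vowel_alt, check_vowel_eq_any] at ih ⊢
      rw [ih]

-- ===== VERDICT (by name: the statement is the Claim_ definition above) =====
theorem contains_vowel_spec : Claim_equal_contains_vowel := by
  intro lst _
  unfold Spec_contains_vowel
  exact contains_vowel_eq lst
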